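-- pv_equiv track=rewrite | github.com/khoai23/neural_network | exampleBuilder.py | writeScoreGrouped
-- ===== SOURCE A (Python) =====
-- def writeScoreGrouped(tagList, relationDict, separator='_'):
-- 	# Write score for the later grouping result
-- 	correctCases, totalCases = 0, 0
-- 	#fullTagList = [tag for groupedTag in tagList for tag in groupedTag]
-- 	for groupIdx, groupedTag in enumerate(tagList):
-- 		for currentTag in groupedTag:
-- 			# Compare with every other tag in tagList
-- 			for comparingIdx, comparingGroup in enumerate(tagList):
-- 				for otherTag in comparingGroup:
-- 					# This sure is getting ugly...
-- 					if(currentTag == otherTag):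
-- 						continue
-- 					if(groupIdx < comparingIdx):
-- 						correctCaseIdx = 0
-- 					elif(comparingIdx < groupIdx):
-- 						correctCaseIdx = 1
-- 					else:
-- 						correctCaseIdx = 2
-- 					# reverse the correctCaseIdx in case of not in same group and otherTag<currentTag
-- 					if(correctCaseIdx < 2 and otherTag < currentTag):
-- 						correctCaseIdx = 1 - correctCaseIdx
-- 					# add the correct/total case into the full value if found
-- 					leftTag, rightTag = (currentTag, otherTag) if(currentTag < otherTag) else (otherTag, currentTag)
-- 					relatedKey = leftTag + separator + rightTag
-- 					relation = relationDict.get(relatedKey, (0,0,0,0))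
-- 					# as key @2 is isSwap(REVERSE), we must do it with total-isSwap instead
-- 					correctCases += relation[correctCaseIdx] if(correctCaseIdx < 2) else (relation[3] - relation[correctCaseIdx])
-- 					totalCases += relation[3]
-- 	# all relation must be searched through twice, thus assertment must be run as additional constraint
-- 	assert correctCases % 2 == 0 and totalCases % 2 == 0, "Something wrong with the checking logic. (Doubled) correctCases {}, totalCases {}".format(correctCases, totalCases)
-- 	correctCases, totalCases = correctCases / 2, totalCases / 2
-- 	return int(correctCases), int(totalCases)
-- ===== SOURCE B (Python) =====
-- def writeScoreGrouped(tagList, relationDict, separator='_'):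
-- 	# Flatten once to (groupIdx, tag) occurrences, then visit each unordered
-- 	# pair exactly once with a direct case formula (no doubling / halving).
-- 	occ = [(gi, tag) for gi, group in enumerate(tagList) for tag in group]
-- 	correct, total = 0, 0
-- 	for i, (gi, x) in enumerate(occ):
-- 		for gj, y in occ[i + 1:]:
-- 			if x == y:
-- 				continue
-- 			(gs, s), (gt, t) = ((gi, x), (gj, y)) if x < y else ((gj, y), (gi, x))
-- 			v = relationDict.get(s + separator + t, (0, 0, 0, 0))
-- 			if gs == gt:
-- 				correct += v[3] - v[2]
-- 			elif gs < gt: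
-- 				correct += v[0]
-- 			else:
-- 				correct += v[1]
-- 			total += v[3]
-- 	return correct, total
-- ===== Notes on version B (the rewrite author's own statement) =====
-- stated objective: alternative
-- what changed: B flattens the groups once into (groupIdx, tag) occurrences and visits each unordered pair exactly once with a direct three-way case formula, instead of A's quadruple loop over all ordered pairs that scores everything twice (with index-flip gymnastics) and then asserts evenness and halves.
import Mathlib
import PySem

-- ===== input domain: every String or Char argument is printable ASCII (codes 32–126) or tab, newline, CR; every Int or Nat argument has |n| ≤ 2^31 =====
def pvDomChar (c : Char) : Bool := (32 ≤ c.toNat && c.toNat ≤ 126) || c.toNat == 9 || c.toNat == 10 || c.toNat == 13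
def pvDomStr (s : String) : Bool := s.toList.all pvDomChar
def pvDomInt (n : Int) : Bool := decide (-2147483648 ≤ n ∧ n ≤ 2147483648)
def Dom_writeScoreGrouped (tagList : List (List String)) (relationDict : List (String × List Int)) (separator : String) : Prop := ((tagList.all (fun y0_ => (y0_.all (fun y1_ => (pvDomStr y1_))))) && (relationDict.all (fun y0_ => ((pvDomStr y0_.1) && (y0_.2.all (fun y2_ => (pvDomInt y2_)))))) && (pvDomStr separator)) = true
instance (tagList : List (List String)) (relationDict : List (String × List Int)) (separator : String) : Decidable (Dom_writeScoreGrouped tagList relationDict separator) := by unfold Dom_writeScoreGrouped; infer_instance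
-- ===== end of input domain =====

-- B replaces A's quadruple loop over ALL ordered occurrence pairs (each unordered
-- pair scored twice, then halved after an assert) by one visit per unordered pair
-- with a direct three-way case formula: roughly half the work (constant factor).
-- Strings are handled as List Char throughout (PySem convention: Lean's own
-- String.append/lt are kernel-opaque); dict.get is first-match on the assoc list.

-- dict.get(key, (0,0,0,0)) on the association list (first match), keys as char lists
def wsgGet (rel : List (List Char × List Int)) (key : List Char) : List Int :=
  (((rel.find? (fun p => p.1 == key)).map (·.2)).getD [0, 0, 0, 0])

-- ===== PORT A =====
def writeScoreGrouped (tagList : List (List String)) (relationDict : List (String × List Int)) (separator : String) : Int × Int :=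
  let tl := tagList.map (fun g => g.map String.toList)
  let rel := relationDict.map (fun p => (p.1.toList, p.2))
  let sep := separator.toList
  let enum := PySem.List.enumerate tl
  let res := enum.foldl (fun ct g =>
    g.2.foldl (fun ct currentTag =>
      enum.foldl (fun ct cg =>
        cg.2.foldl (fun ct otherTag =>
          if currentTag == otherTag then ct
          else
            let idx0 : Int := if g.1 < cg.1 then 0 else if cg.1 < g.1 then 1 else 2
            let idx : Int := if idx0 < 2 ∧ otherTag < currentTag then 1 - idx0 else idx0
            let lr := if currentTag < otherTag then (currentTag, otherTag) else (otherTag, currentTag)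
            let relation := wsgGet rel (lr.1 ++ sep ++ lr.2)
            let corr : Int :=
              if idx < 2 then (PySem.List.pyGet? relation idx).getD 0
              else (PySem.List.pyGet? relation 3).getD 0 - (PySem.List.pyGet? relation idx).getD 0
            (ct.1 + corr, ct.2 + (PySem.List.pyGet? relation 3).getD 0))
          ct)
        ct)
      ct)
    ((0 : Int), (0 : Int))
  -- the assert never fires: each unordered pair is scored twice symmetrically, so both
  -- components are even, and int(c/2) of an even c is exact floor division
  (PySem.Int.floordiv res.1 2, PySem.Int.floordiv res.2 2)

-- ===== PORT B =====
-- per unordered occurrence pair: ((correct contribution, total contribution))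
def wsgContrib (rel : List (List Char × List Int)) (sep : List Char) (a b : Int × List Char) : Int × Int :=
  if a.2 == b.2 then (0, 0)
  else
    let st := if a.2 < b.2 then (a, b) else (b, a)
    let v := wsgGet rel (st.1.2 ++ sep ++ st.2.2)
    let c : Int :=
      if st.1.1 = st.2.1 then (PySem.List.pyGet? v 3).getD 0 - (PySem.List.pyGet? v 2).getD 0
      else if st.1.1 < st.2.1 then (PySem.List.pyGet? v 0).getD 0
      else (PySem.List.pyGet? v 1).getD 0
    (c, (PySem.List.pyGet? v 3).getD 0)

-- 'for i, a in enumerate(occ): for b in occ[i+1:]': head against the rest, forward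
def wsgPairs (rel : List (List Char × List Int)) (sep : List Char) : List (Int × List Char) → Int × Int → Int × Int
  | [], ct => ct
  | a :: rest, ct =>
      wsgPairs rel sep rest
        (rest.foldl (fun ct b =>
          let c := wsgContrib rel sep a b
          (ct.1 + c.1, ct.2 + c.2)) ct)

def writeScoreGrouped_alt (tagList : List (List String)) (relationDict : List (String × List Int)) (separator : String) : Int × Int :=
  let rel := relationDict.map (fun p => (p.1.toList, p.2))
  let occ := (PySem.List.enumerate (tagList.map (fun g => g.map String.toList))).flatMap
    (fun g => g.2.map (fun t => (g.1, t)))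
  wsgPairs rel separator.toList occ (0, 0)

-- ===== PRECONDITION & SPEC =====
-- Pre_ excludes exactly the inputs on which Python A raises IndexError: a dict value of
-- length < 4 whose key is actually looked up, i.e. whose key is minTag+separator+maxTag
-- for two distinct tags occurring in tagList (B raises on the same inputs).
def Pre_writeScoreGrouped (tagList : List (List String)) (relationDict : List (String × List Int)) (separator : String) : Prop :=
  ∀ x ∈ tagList.flatten, ∀ y ∈ tagList.flatten, x.toList < y.toList →
    ∀ p ∈ relationDict, p.1.toList = x.toList ++ separator.toList ++ y.toList → 4 ≤ p.2.length
instance (tagList : List (List String)) (relationDict : List (String × List Int)) (separator : String) : Decidable (Pre_writeScoreGrouped tagList relationDict separator) := by unfold Pre_writeScoreGrouped; infer_instance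

def pvWitness_writeScoreGrouped : List (List String) × (List (String × List Int)) × String :=
  ([["a", "b"], ["c"]], [("a_b", [1, 0, 0, 2]), ("a_c", [0, 1, 0, 3])], "_")

def Spec_writeScoreGrouped (tagList : List (List String)) (relationDict : List (String × List Int)) (separator : String) (out : Int × Int) : Prop := out = writeScoreGrouped_alt tagList relationDict separator
instance (tagList : List (List String)) (relationDict : List (String × List Int)) (separator : String) (out : Int × Int) : Decidable (Spec_writeScoreGrouped tagList relationDict separator out) := by unfold Spec_writeScoreGrouped; infer_instance

-- ===== CLAIM (what is proved, stated in full; the proofs are below) =====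
def Claim_equal_writeScoreGrouped : Prop := ∀ (tagList : List (List String)) (relationDict : List (String × List Int)) (separator : String), Dom_writeScoreGrouped tagList relationDict separator → Pre_writeScoreGrouped tagList relationDict separator → Spec_writeScoreGrouped tagList relationDict separator (writeScoreGrouped tagList relationDict separator)

-- ===== LEMMAS AND PROOFS =====

-- A's innermost loop body as a per-ordered-pair contribution
def wsgFA (rel : List (List Char × List Int)) (sep : List Char) (a b : Int × List Char) : Int × Int :=
  if a.2 == b.2 then (0, 0)
  else
    let idx0 : Int := if a.1 < b.1 then 0 else if b.1 < a.1 then 1 else 2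
    let idx : Int := if idx0 < 2 ∧ b.2 < a.2 then 1 - idx0 else idx0
    let lr := if a.2 < b.2 then (a.2, b.2) else (b.2, a.2)
    let relation := wsgGet rel (lr.1 ++ sep ++ lr.2)
    let corr : Int :=
      if idx < 2 then (PySem.List.pyGet? relation idx).getD 0
      else (PySem.List.pyGet? relation 3).getD 0 - (PySem.List.pyGet? relation idx).getD 0
    (corr, (PySem.List.pyGet? relation 3).getD 0)

-- sum of f over unordered pairs of l (each pair once, head against the rest)
def wsgT (f : (Int × List Char) → (Int × List Char) → Int × Int) : List (Int × List Char) → Int × Int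
  | [] => (0, 0)
  | a :: rest => (rest.map (f a)).sum + wsgT f rest

lemma wsg_addpair (p q : Int × Int) : (p.1 + q.1, p.2 + q.2) = p + q := rfl

-- A's (zeta-expanded) loop body is an additive step of wsgFA
lemma wsg_stepA (rel : List (List Char × List Int)) (sep : List Char)
    (i : Int) (x : List Char) (j : Int) (y : List Char) (ct : Int × Int) :
    (if x == y then ct else (ct.1 + (if (if (if i < j then (0:Int) else if j < i then 1 else 2) < 2 ∧ y < x then 1 - (if i < j then (0:Int) else if j < i then 1 else 2) else (if i < j then (0:Int) else if j < i then 1 else 2)) < 2 then (PySem.List.pyGet? (wsgGet rel ((if x < y then (x, y) else (y, x)).1 ++ sep ++ (if x < y then (x, y) else (y, x)).2)) (if (if i < j then (0:Int) else if j < i then 1 else 2) < 2 ∧ y < x then 1 - (if i < j then (0:Int) else if j < i then 1 else 2) else (if i < j then (0:Int) else if j < i then 1 else 2))).getD 0 else (PySem.List.pyGet? (wsgGet rel ((if x < y then (x, y) else (y, x)).1 ++ sep ++ (if x < y then (x, y) else (y, x)).2)) 3).getD 0 - (PySem.List.pyGet? (wsgGet rel ((if x < y then (x, y) else (y, x)).1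 ++ sep ++ (if x < y then (x, y) else (y, x)).2)) (if (if i < j then (0:Int) else if j < i then 1 else 2) < 2 ∧ y < x then 1 - (if i < j then (0:Int) else if j < i then 1 else 2) else (if i < j then (0:Int) else if j < i then 1 else 2))).getD 0), ct.2 + (PySem.List.pyGet? (wsgGet rel ((if x < y then (x, y) else (y, x)).1 ++ sep ++ (if x < y then (x, y) else (y, x)).2)) 3).getD 0)) = ct + wsgFA rel sep (i, x) (j, y) := by
  rw [wsgFA]
  by_cases h : x == y
  · simp [h]
  · simp only [h, Bool.false_eq_true]
    rw [← wsg_addpair]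
    rfl

-- innermost loop (over one comparing group) as a sum
lemma wsg_A_inner (rel : List (List Char × List Int)) (sep : List Char)
    (i : Int) (x : List Char) (j : Int) :
    ∀ (ts : List (List Char)) (ct : Int × Int),
    ts.foldl (fun ct y => (if x == y then ct else (ct.1 + (if (if (if i < j then (0:Int) else if j < i then 1 else 2) < 2 ∧ y < x then 1 - (if i < j then (0:Int) else if j < i then 1 else 2) else (if i < j then (0:Int) else if j < i then 1 else 2)) < 2 then (PySem.List.pyGet? (wsgGet rel ((if x < y then (x, y) else (y, x)).1 ++ sep ++ (if x < y then (x, y) else (y, x)).2)) (if (if i < j then (0:Int) else if j < i then 1 else 2) < 2 ∧ y < x then 1 - (if i < j then (0:Int) else if j < i then 1 else 2) else (if i < j then (0:Int) else if j < i then 1 else 2))).getD 0 else (PySem.List.pyGet? (wsgGet rel ((if x < y then (x, y) else (y, x)).1 ++ sep ++ (if x < y then (x, y) else (y, x)).2)) 3).getD 0 - (PySem.List.pyGet? (wsgGet rel ((if x < y then (x, y) else (y, x)).1 ++ sep ++ (if x < y then (x, y) else (y, x)).2)) (if (if i < j then (0:Int) else if j < i then 1 else 2) < 2 ∧ y < x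 then 1 - (if i < j then (0:Int) else if j < i then 1 else 2) else (if i < j then (0:Int) else if j < i then 1 else 2))).getD 0), ct.2 + (PySem.List.pyGet? (wsgGet rel ((if x < y then (x, y) else (y, x)).1 ++ sep ++ (if x < y then (x, y) else (y, x)).2)) 3).getD 0))) ct
    = ct + (ts.map (fun y => wsgFA rel sep (i, x) (j, y))).sum
  | [], ct => by simp
  | y :: ts, ct => by
      rw [List.foldl_cons]
      rw [wsg_A_inner rel sep i x j ts]
      rw [wsg_stepA]
      simp [add_assoc]


-- middle loop (over all comparing groups) as a sum over the flattened occurrence list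
lemma wsg_A_mid (rel : List (List Char × List Int)) (sep : List Char)
    (g : Int × List (List Char)) (x : List Char) :
    ∀ (enum : List (Int × List (List Char))) (ct : Int × Int),
    enum.foldl (fun ct cg => cg.2.foldl (fun ct y => (if x == y then ct else (ct.1 + (if (if (if g.1 < cg.1 then (0:Int) else if cg.1 < g.1 then 1 else 2) < 2 ∧ y < x then 1 - (if g.1 < cg.1 then (0:Int) else if cg.1 < g.1 then 1 else 2) else (if g.1 < cg.1 then (0:Int) else if cg.1 < g.1 then 1 else 2)) < 2 then (PySem.List.pyGet? (wsgGet rel ((if x < y then (x, y) else (y, x)).1 ++ sep ++ (if x < y then (x, y) else (y, x)).2)) (if (if g.1 < cg.1 then (0:Int) else if cg.1 < g.1 then 1 else 2) < 2 ∧ y < x then 1 - (if g.1 < cg.1 then (0:Int) else if cg.1 < g.1 then 1 else 2) else (if g.1 < cg.1 then (0:Int) else if cg.1 < g.1 then 1 else 2))).getD 0 else (PySem.List.pyGet? (wsgGet rel ((if x < y then (x, y) else (y, x)).1 ++ sep ++ (if x < y then (x, y) else (y, x)).2)) 3).getD 0 - (PySem.List.pyGet? (wsgGet rel ((if x < y then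 (x, y) else (y, x)).1 ++ sep ++ (if x < y then (x, y) else (y, x)).2)) (if (if g.1 < cg.1 then (0:Int) else if cg.1 < g.1 then 1 else 2) < 2 ∧ y < x then 1 - (if g.1 < cg.1 then (0:Int) else if cg.1 < g.1 then 1 else 2) else (if g.1 < cg.1 then (0:Int) else if cg.1 < g.1 then 1 else 2))).getD 0), ct.2 + (PySem.List.pyGet? (wsgGet rel ((if x < y then (x, y) else (y, x)).1 ++ sep ++ (if x < y then (x, y) else (y, x)).2)) 3).getD 0))) ct) ct
    = ct + ((enum.flatMap (fun q => q.2.map (fun t => (q.1, t)))).map (fun b => wsgFA rel sep (g.1, x) b)).sum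
  | [], ct => by simp
  | cg :: enum, ct => by
      rw [List.foldl_cons, wsg_A_mid rel sep g x enum, wsg_A_inner rel sep g.1 x cg.1]
      simp [add_assoc, List.map_map, Function.comp_def]

-- loop over the current group's tags
lemma wsg_A_tags (rel : List (List Char × List Int)) (sep : List Char)
    (enumAll : List (Int × List (List Char))) (g : Int × List (List Char)) :
    ∀ (ts : List (List Char)) (ct : Int × Int),
    ts.foldl (fun ct currentTag =>
      enumAll.foldl (fun ct cg => cg.2.foldl (fun ct y => (if currentTag == y then ct else (ct.1 + (if (if (if g.1 < cg.1 then (0:Int) else if cg.1 < g.1 then 1 else 2) < 2 ∧ y < currentTag then 1 - (if g.1 < cg.1 then (0:Int) else if cg.1 < g.1 then 1 else 2) else (if g.1 < cg.1 then (0:Int) else if cg.1 < g.1 then 1 else 2)) < 2 then (PySem.List.pyGet? (wsgGet rel ((if currentTag < y then (currentTag, y) else (y, currentTag)).1 ++ sep ++ (if currentTag < y then (currentTag, y) else (y, currentTag)).2)) (if (if g.1 < cg.1 then (0:Int) else if cg.1 < g.1 then 1 else 2) < 2 ∧ y < currentTag then 1 - (if g.1 < cg.1 then (0:Int) else if cg.1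 < g.1 then 1 else 2) else (if g.1 < cg.1 then (0:Int) else if cg.1 < g.1 then 1 else 2))).getD 0 else (PySem.List.pyGet? (wsgGet rel ((if currentTag < y then (currentTag, y) else (y, currentTag)).1 ++ sep ++ (if currentTag < y then (currentTag, y) else (y, currentTag)).2)) 3).getD 0 - (PySem.List.pyGet? (wsgGet rel ((if currentTag < y then (currentTag, y) else (y, currentTag)).1 ++ sep ++ (if currentTag < y then (currentTag, y) else (y, currentTag)).2)) (if (if g.1 < cg.1 then (0:Int) else if cg.1 < g.1 then 1 else 2) < 2 ∧ y < currentTag then 1 - (if g.1 < cg.1 then (0:Int) else if cg.1 < g.1 then 1 else 2) else (if g.1 < cg.1 then (0:Int) else if cg.1 < g.1 then 1 else 2))).getD 0), ct.2 + (PySem.List.pyGet? (wsgGet rel ((if currentTag < y then (currentTag, y) else (y, currentTag)).1 ++ sep ++ (if currentTag < y then (currentTag, y) else (y, currentTag)).2)) 3).getD 0))) ct) ct) ct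
    = ct + (ts.map (fun x =>
        ((enumAll.flatMap (fun q => q.2.map (fun t => (q.1, t)))).map (fun b => wsgFA rel sep (g.1, x) b)).sum)).sum
  | [], ct => by simp
  | x :: ts, ct => by
      rw [List.foldl_cons, wsg_A_tags rel sep enumAll g ts, wsg_A_mid rel sep g x enumAll]
      simp [add_assoc]

-- outer loop: the whole quadruple loop is a double sum over the flattened occurrence list
lemma wsg_A_outer (rel : List (List Char × List Int)) (sep : List Char)
    (enumAll : List (Int × List (List Char))) :
    ∀ (enum : List (Int × List (List Char))) (ct : Int × Int),
    enum.foldl (fun ct g =>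
      g.2.foldl (fun ct currentTag =>
        enumAll.foldl (fun ct cg => cg.2.foldl (fun ct y => (if currentTag == y then ct else (ct.1 + (if (if (if g.1 < cg.1 then (0:Int) else if cg.1 < g.1 then 1 else 2) < 2 ∧ y < currentTag then 1 - (if g.1 < cg.1 then (0:Int) else if cg.1 < g.1 then 1 else 2) else (if g.1 < cg.1 then (0:Int) else if cg.1 < g.1 then 1 else 2)) < 2 then (PySem.List.pyGet? (wsgGet rel ((if currentTag < y then (currentTag, y) else (y, currentTag)).1 ++ sep ++ (if currentTag < y then (currentTag, y) else (y, currentTag)).2)) (if (if g.1 < cg.1 then (0:Int) else if cg.1 < g.1 then 1 else 2) < 2 ∧ y < currentTag then 1 - (if g.1 < cg.1 then (0:Int) else if cg.1 < g.1 then 1 else 2) else (if g.1 < cg.1 then (0:Int) else if cg.1 < g.1 then 1 else 2))).getD 0 else (PySem.List.pyGet? (wsgGet rel ((if currentTag < y then (currentTag, y) else (y, currentTag)).1 ++ sep ++ (if currentTag < y then (currentTag, y) else (y, currentTag)).2)) 3).getD 0 - (PySem.List.pyGet? (wsgGet rel ((if currentTag < y then (currentTag, y) else (y, currentTag)).1 ++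 sep ++ (if currentTag < y then (currentTag, y) else (y, currentTag)).2)) (if (if g.1 < cg.1 then (0:Int) else if cg.1 < g.1 then 1 else 2) < 2 ∧ y < currentTag then 1 - (if g.1 < cg.1 then (0:Int) else if cg.1 < g.1 then 1 else 2) else (if g.1 < cg.1 then (0:Int) else if cg.1 < g.1 then 1 else 2))).getD 0), ct.2 + (PySem.List.pyGet? (wsgGet rel ((if currentTag < y then (currentTag, y) else (y, currentTag)).1 ++ sep ++ (if currentTag < y then (currentTag, y) else (y, currentTag)).2)) 3).getD 0))) ct) ct) ct) ct
    = ct + ((enum.flatMap (fun q => q.2.map (fun t => (q.1, t)))).map (fun a =>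
        ((enumAll.flatMap (fun q => q.2.map (fun t => (q.1, t)))).map (fun b => wsgFA rel sep a b)).sum)).sum
  | [], ct => by simp
  | g :: enum, ct => by
      rw [List.foldl_cons, wsg_A_outer rel sep enumAll enum, wsg_A_tags rel sep enumAll g g.2]
      simp [add_assoc, List.map_map, Function.comp_def]



-- B's inner loop as a sum
lemma wsg_B_inner (rel : List (List Char × List Int)) (sep : List Char) (a : Int × List Char) :
    ∀ (l : List (Int × List Char)) (ct : Int × Int),
    l.foldl (fun ct b => (ct.1 + (wsgContrib rel sep a b).1, ct.2 + (wsgContrib rel sep a b).2)) ct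
    = ct + (l.map (wsgContrib rel sep a)).sum
  | [], ct => by simp
  | b :: l, ct => by
      rw [List.foldl_cons, wsg_B_inner rel sep a l, wsg_addpair]
      simp [add_assoc]

-- B's whole pass is the unordered-pair sum of wsgContrib
lemma wsg_B_pairs (rel : List (List Char × List Int)) (sep : List Char) :
    ∀ (l : List (Int × List Char)) (ct : Int × Int),
    wsgPairs rel sep l ct = ct + wsgT (wsgContrib rel sep) l
  | [], ct => by simp [wsgPairs, wsgT]
  | a :: l, ct => by
      simp only [wsgPairs, wsgT]
      rw [wsg_B_pairs rel sep l, wsg_B_inner rel sep a l]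
      simp [add_assoc]

-- wsgFA and wsgContrib agree on every ordered pair
lemma wsg_fa_eq_fb (rel : List (List Char × List Int)) (sep : List Char) :
    ∀ a b : Int × List Char, wsgFA rel sep a b = wsgContrib rel sep a b := by
  rintro ⟨i, x⟩ ⟨j, y⟩
  simp only [wsgFA, wsgContrib]
  by_cases hxy : x == y
  · simp [hxy]
  · have hne : x ≠ y := by simpa using hxy
    simp only [hxy, Bool.false_eq_true, if_false]
    rcases lt_or_gt_of_ne hne with hlt | hgt
    · have hnot : ¬ y < x := asymm hlt
      rcases lt_trichotomy i j with h1 | h1 | h1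
      · norm_num [hlt, hnot, h1, asymm h1, h1.ne, h1.ne']
      · norm_num [hlt, hnot, h1]
      · norm_num [hlt, hnot, h1, asymm h1, h1.ne, h1.ne']
    · have hnot : ¬ x < y := asymm hgt
      rcases lt_trichotomy i j with h1 | h1 | h1
      · norm_num [hgt, hnot, h1, asymm h1, h1.ne, h1.ne']
      · norm_num [hgt, hnot, h1]
      · norm_num [hgt, hnot, h1, asymm h1, h1.ne, h1.ne']

-- wsgContrib is symmetric and vanishes on the diagonal
lemma wsg_fb_symm (rel : List (List Char × List Int)) (sep : List Char) (a b : Int × List Char) :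
    wsgContrib rel sep a b = wsgContrib rel sep b a := by
  simp only [wsgContrib]
  by_cases hxy : a.2 == b.2
  · have h := eq_of_beq hxy
    simp [h]
  · have hne : a.2 ≠ b.2 := by simpa using hxy
    have hxy' : ¬ (b.2 == a.2) = true := by simpa using hne.symm
    simp only [hxy, hxy', Bool.false_eq_true, if_false]
    rcases lt_or_gt_of_ne hne with hlt | hgt
    · simp [hlt, asymm hlt]
    · simp [hgt, asymm hgt]

lemma wsg_fb_diag (rel : List (List Char × List Int)) (sep : List Char) (a : Int × List Char) :
    wsgContrib rel sep a a = (0, 0) := by simp [wsgContrib]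

-- the double sum of a symmetric, diagonal-free f is twice the unordered-pair sum
lemma wsg_double (f : (Int × List Char) → (Int × List Char) → Int × Int)
    (hs : ∀ a b, f a b = f b a) (hd : ∀ a, f a a = (0, 0)) :
    ∀ l : List (Int × List Char),
    (l.map (fun a => (l.map (f a)).sum)).sum = wsgT f l + wsgT f l
  | [] => rfl
  | x :: r => by
      have ih := wsg_double f hs hd r
      have hmc : r.map (fun a => f a x) = r.map (f x) := List.map_congr_left (fun a _ => hs a x)
      simp only [List.map_cons, List.sum_cons, List.sum_map_add, wsgT, hd, hmc, ih, Prod.mk_zero_zero]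
      abel

-- halving an even pair
lemma wsg_fdiv_double (t : Int) : PySem.Int.floordiv (t + t) 2 = t := by
  rw [PySem.Int.floordiv_eq_ediv_of_pos (by norm_num)]
  omega

theorem writeScoreGrouped_spec : Claim_equal_writeScoreGrouped := by
  intro tagList relationDict separator _ _
  unfold Spec_writeScoreGrouped
  simp only [writeScoreGrouped, writeScoreGrouped_alt]
  rw [wsg_A_outer, wsg_B_pairs]
  have hfg : ∀ a b : Int × List Char,
      wsgFA (relationDict.map (fun p => (p.1.toList, p.2))) separator.toList a b
      = wsgContrib (relationDict.map (fun p => (p.1.toList, p.2))) separator.toList a b :=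
    wsg_fa_eq_fb _ _
  simp only [funext fun a => funext fun b => hfg a b]
  rw [wsg_double _ (wsg_fb_symm _ _) (wsg_fb_diag _ _)]
  have hz : ((0, 0) : Int × Int) = 0 := rfl
  rw [hz, zero_add, zero_add, Prod.fst_add, Prod.snd_add, wsg_fdiv_double, wsg_fdiv_double]
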